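-- pv_equiv track=rewrite | github.com/Michael-scx/UniAssignment | week_6_uni_course.py | get_department_enrollment_summary
-- ===== SOURCE A (Python) =====
-- def get_department_enrollment_summary(course_data):
--     departments = []
--     totals = []
--
--     for item in course_data:
--         course_code = item[0]
--         department = item[1]
--         enrollments = item[2]
--
--
--         index = -1
--         for i in range(len(departments)):
--             if departments[i] == department:
--                 index = i
--                 break
--
--         if index == -1:
--             departments.append(department)
--
--             total_students = 0
--             for x in enrollments:
--                 total_students += x
--             totals.append(total_students)
--
--         else:
--             for x in enrollments:
--                 totals[index] +=x
--
--
--     n = len(departments)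
--     for i in range(n):
--         for j in range(0, n-i-1):
--             if departments[j] > departments[j + 1]:
--
--                 temp = departments[j]
--                 departments[j] = departments[j+1]
--                 departments[j + 1] = temp
--
--
--                 temp2 = totals[j]
--                 totals[j] = totals[j+1]
--                 totals[j + 1] = temp2
--
--
--     summary = []
--     for i in range(len(departments)):
--         summary.append((departments[i], totals[i]))
--
--     return summary
-- ===== SOURCE B (Python) =====
-- from itertools import groupby
--
-- def get_department_enrollment_summary(course_data):
--     rows = sorted(course_data, key=lambda r: r[1])
--     summary = []
--     for dept, group in groupby(rows, key=lambda r: r[1]):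
--         summary.append((dept, sum(sum(r[2]) for r in group)))
--     return summary
-- ===== Notes on version B (the rewrite author's own statement) =====
-- stated objective: faster
-- what changed: Replaces A's per-item linear scan of the departments list plus a hand-written O(D^2) bubble sort with a single sort by department followed by one pass that sums adjacent equal-key runs (itertools.groupby).
import Mathlib
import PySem

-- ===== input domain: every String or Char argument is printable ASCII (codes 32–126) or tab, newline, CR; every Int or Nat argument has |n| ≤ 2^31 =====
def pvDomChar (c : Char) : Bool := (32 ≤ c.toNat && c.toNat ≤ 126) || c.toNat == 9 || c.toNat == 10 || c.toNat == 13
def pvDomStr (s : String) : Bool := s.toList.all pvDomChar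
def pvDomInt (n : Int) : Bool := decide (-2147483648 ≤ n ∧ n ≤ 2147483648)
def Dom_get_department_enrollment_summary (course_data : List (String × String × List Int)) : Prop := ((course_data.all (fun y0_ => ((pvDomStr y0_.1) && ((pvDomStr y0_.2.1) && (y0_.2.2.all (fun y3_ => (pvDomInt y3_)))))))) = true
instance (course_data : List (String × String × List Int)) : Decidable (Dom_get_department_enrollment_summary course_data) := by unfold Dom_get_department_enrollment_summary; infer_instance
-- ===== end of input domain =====

-- B replaces A's repeated linear department scans plus hand-written bubble sort by
-- sort-by-department followed by one pass summing adjacent runs (itertools.groupby).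

-- ===== PORT A =====
-- inner loop 'for i in range(len(departments)): if departments[i] == department: index = i; break'
def pvFindIdx (deps : List String) (dept : String) (i : Int) : Int :=
  match deps with
  | [] => -1
  | d :: rest => if d == dept then i else pvFindIdx rest dept (i + 1)

-- inner bubble loop 'for j in range(0, n-i-1): …' as a budgeted adjacent-swap pass over both
-- parallel lists simultaneously (index j becomes the structural position; same comparisons, same swaps)
def pvBubblePass (deps : List String) (tots : List Int) (m : Nat) : List String × List Int :=
  match deps, tots, m with
  | d1 :: d2 :: ds, t1 :: t2 :: ts, m + 1 =>
    if d2 < d1 then   -- departments[j] > departments[j+1]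
      let r := pvBubblePass (d1 :: ds) (t1 :: ts) m
      (d2 :: r.1, t2 :: r.2)
    else
      let r := pvBubblePass (d2 :: ds) (t2 :: ts) m
      (d1 :: r.1, t1 :: r.2)
  | d, t, _ => (d, t)

def get_department_enrollment_summary (course_data : List (String × String × List Int)) : List (String × Int) :=
  -- aggregation loop over course_data with the two parallel accumulator lists
  let st := course_data.foldl (fun (st : List String × List Int) item =>
    let department := item.2.1
    let enrollments := item.2.2
    let index := pvFindIdx st.1 department 0
    if index == -1 then
      (st.1 ++ [department], st.2 ++ [enrollments.foldl (fun acc x => acc + x) 0])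
    else
      -- index ≥ 0 here (it is a position found in st.1), so .toNat is exact; 'totals[index] += x'
      (st.1, enrollments.foldl (fun ts x => ts.set index.toNat (ts.getD index.toNat 0 + x)) st.2))
    ([], [])
  -- bubble sort: 'for i in range(n):' outer loop
  let n := st.1.length
  let st2 := (PySem.List.pyRange 0 (n : Int) 1).foldl
    (fun st i => pvBubblePass st.1 st.2 (n - i.toNat - 1)) st
  -- final 'for i in range(len(departments)): summary.append(…)'; indices are in range, getD is exact
  (PySem.List.pyRange 0 (n : Int) 1).foldl
    (fun acc i => acc ++ [(st2.1.getD i.toNat "", st2.2.getD i.toNat 0)]) []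

-- ===== PORT B =====
-- itertools.groupby on the dept-sorted rows, ported by hand (PySem has no groupby):
-- one (dept, total) entry per maximal run of equal adjacent keys
def pvGroupSum : List (String × String × List Int) → List (String × Int)
  | [] => []
  | r :: rest =>
    (r.2.1, ((r :: rest.takeWhile (fun q => q.2.1 == r.2.1)).map (fun q => q.2.2.sum)).sum)
      :: pvGroupSum (rest.dropWhile (fun q => q.2.1 == r.2.1))
  termination_by l => l.length
  decreasing_by
    simp only [List.length_cons]
    exact Nat.lt_succ_of_le (List.length_dropWhile_le _ _)

def get_department_enrollment_summary_alt (course_data : List (String × String × List Int)) : List (String × Int) :=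
  pvGroupSum (PySem.List.sorted course_data (fun r => r.2.1) false)

-- ===== PRECONDITION & SPEC =====
def Spec_get_department_enrollment_summary (course_data : List (String × String × List Int)) (out : List (String × Int)) : Prop := out = get_department_enrollment_summary_alt course_data
instance (course_data : List (String × String × List Int)) (out : List (String × Int)) : Decidable (Spec_get_department_enrollment_summary course_data out) := by unfold Spec_get_department_enrollment_summary; infer_instance

-- ===== CLAIM (what is proved, stated in full; the proofs are below) =====
def Claim_equal_get_department_enrollment_summary : Prop := ∀ (course_data : List (String × String × List Int)), Dom_get_department_enrollment_summary course_data → Spec_get_department_enrollment_summary course_data (get_department_enrollment_summary course_data)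

-- ===== LEMMAS AND PROOFS =====

-- total enrollment of department d in cd
def pvTot (d : String) (cd : List (String × String × List Int)) : Int :=
  ((cd.filter (fun r => r.2.1 == d)).map (fun r => r.2.2.sum)).sum

-- proof-side single-list view of pvBubblePass
def pvPass : List (String × Int) → Nat → List (String × Int)
  | x :: y :: t, m + 1 =>
    if y.1 < x.1 then y :: pvPass (x :: t) m else x :: pvPass (y :: t) m
  | l, _ => l

-- proof-side countdown view of the outer bubble loop
def pvGo : List (String × Int) → Nat → List (String × Int)
  | l, 0 => l
  | l, k + 1 => pvGo (pvPass l k) k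

theorem pvFindIdx_spec (deps : List String) (dept : String) (i : Int) :
    pvFindIdx deps dept i = if dept ∈ deps then i + (deps.idxOf dept : Int) else -1 := by
  induction deps generalizing i with
  | nil => simp [pvFindIdx]
  | cons d rest ih =>
    by_cases h : d = dept
    · subst h; simp [pvFindIdx, List.idxOf_cons_self]
    · have hne : (d == dept) = false := by simp [h]
      simp only [pvFindIdx, hne, if_false, ih, List.mem_cons]
      by_cases hm : dept ∈ rest
      · have : ¬ dept = d := fun hh => h hh.symm
        simp [hm, this, List.idxOf_cons, hne]
        push_cast
        ring
      · simp [hm]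
        intro hh
        exact absurd hh.symm h

theorem pvSetFold (enr : List Int) (ts : List Int) (i : Nat) (h : i < ts.length) :
    enr.foldl (fun ts x => ts.set i (ts.getD i 0 + x)) ts = ts.set i (ts.getD i 0 + enr.sum) := by
  induction enr generalizing ts with
  | nil =>
    simp only [List.foldl_nil, List.sum_nil, add_zero]
    rw [List.getD_eq_getElem _ _ h]
    exact (List.set_getElem_self ..).symm
  | cons x rest ih =>
    simp only [List.foldl_cons, List.sum_cons]
    rw [ih _ (by simpa using h)]
    rw [List.set_set]
    congr 1
    rw [List.getD_eq_getElem _ _ (by simpa using h), List.getElem_set_self (by simpa using h)]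
    rw [List.getD_eq_getElem _ _ h]
    ring

theorem pvMapSet (deps : List String) (g : String → Int) (k : String) (v : Int)
    (hnd : deps.Nodup) (hk : k ∈ deps) :
    (deps.map g).set (deps.idxOf k) v = deps.map (fun d => if d = k then v else g d) := by
  induction deps with
  | nil => simp at hk
  | cons d rest ih =>
    by_cases h : d = k
    · subst h
      have hnk : d ∉ rest := (List.nodup_cons.mp hnd).1
      have hmc : rest.map (fun x => if x = d then v else g x) = rest.map g :=
        List.map_congr_left (fun x hx => by
          have : ¬ x = d := fun hh => hnk (hh ▸ hx)
          simp [this])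
      simp [List.idxOf_cons_self, hmc]
    · have hm : k ∈ rest := by
        rcases List.mem_cons.mp hk with h1 | h1
        · exact absurd h1.symm h
        · exact h1
      have hne : (d == k) = false := by simp [h]
      simp [List.idxOf_cons, hne, h, ih (List.nodup_cons.mp hnd).2 hm]

theorem pvPass_perm (m : Nat) (l : List (String × Int)) : (pvPass l m).Perm l := by
  induction m generalizing l with
  | zero => match l with
    | [] => simp [pvPass]
    | [x] => simp [pvPass]
    | x :: y :: t => simp [pvPass]
  | succ m ih =>
    match l with
    | [] => simp [pvPass]
    | [x] => simp [pvPass]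
    | x :: y :: t =>
      simp only [pvPass]
      split
      · exact ((ih (x :: t)).cons y).trans (List.Perm.swap x y t)
      · exact (ih (y :: t)).cons x

theorem pvPass_append (m : Nat) (l s : List (String × Int)) (h : l.length = m + 1) :
    pvPass (l ++ s) m = pvPass l m ++ s := by
  induction m generalizing l s with
  | zero =>
    match l, h with
    | [x], _ => match s with
      | [] => simp [pvPass]
      | y :: s' => simp [pvPass]
  | succ m ih =>
    match l, h with
    | x :: y :: t, h =>
      have ht : (x :: t).length = m + 1 := by simpa using h
      have ht' : (y :: t).length = m + 1 := by simpa using h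
      simp only [List.cons_append, pvPass]
      split
      · rw [show x :: (t ++ s) = (x :: t) ++ s from rfl, ih (x :: t) s ht]; rfl
      · rw [show y :: (t ++ s) = (y :: t) ++ s from rfl, ih (y :: t) s ht']; rfl

theorem pvPass_max (m : Nat) (l : List (String × Int)) (h : l.length = m + 1) :
    ∃ l' z, pvPass l m = l' ++ [z] ∧ ∀ p ∈ l', p.1 ≤ z.1 := by
  induction m generalizing l with
  | zero =>
    match l, h with
    | [x], _ => exact ⟨[], x, by simp [pvPass], by simp⟩
  | succ m ih =>
    match l, h with
    | x :: y :: t, h =>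
      simp only [pvPass]
      split
      case isTrue hlt =>
        obtain ⟨l'', z, heq, hle⟩ := ih (x :: t) (by simpa using h)
        refine ⟨y :: l'', z, by simp [heq], ?_⟩
        intro p hp
        rcases List.mem_cons.mp hp with hpy | hp'
        · subst hpy
          have hx : x ∈ l'' ++ [z] := heq ▸ (pvPass_perm m (x :: t)).mem_iff.mpr (by simp)
          rcases List.mem_append.mp hx with hx' | hx'
          · exact le_trans (le_of_lt hlt) (hle _ hx')
          · simp at hx'; exact le_trans (le_of_lt hlt) (le_of_eq (by rw [hx']))
        · exact hle _ hp'
      case isFalse hge =>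
        obtain ⟨l'', z, heq, hle⟩ := ih (y :: t) (by simpa using h)
        refine ⟨x :: l'', z, by simp [heq], ?_⟩
        intro p hp
        rcases List.mem_cons.mp hp with hpx | hp'
        · subst hpx
          have hy : y ∈ l'' ++ [z] := heq ▸ (pvPass_perm m (y :: t)).mem_iff.mpr (by simp)
          have hxy : p.1 ≤ y.1 := le_of_not_gt hge
          rcases List.mem_append.mp hy with hy' | hy'
          · exact le_trans hxy (hle _ hy')
          · simp at hy'; exact le_trans hxy (le_of_eq (by rw [hy']))
        · exact hle _ hp'

theorem pvGo_sorted (k : Nat) (l s : List (String × Int)) (hl : l.length = k)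
    (hs : s.Pairwise (fun p q => p.1 ≤ q.1))
    (hls : ∀ p ∈ l, ∀ q ∈ s, p.1 ≤ q.1) :
    (pvGo (l ++ s) k).Pairwise (fun p q => p.1 ≤ q.1) ∧ (pvGo (l ++ s) k).Perm (l ++ s) := by
  induction k generalizing l s with
  | zero =>
    match l, hl with
    | [], _ =>
      simp only [List.nil_append, pvGo]
      exact ⟨hs, List.Perm.refl s⟩
  | succ k ih =>
    simp only [pvGo]
    rw [pvPass_append k l s hl]
    obtain ⟨l', z, heq, hle⟩ := pvPass_max k l hl
    have hperm : (l' ++ [z]).Perm l := heq ▸ pvPass_perm k l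
    have hlen : l'.length = k := by
      have := hperm.length_eq; simp [hl] at this; omega
    have hzl : z ∈ l := hperm.mem_iff.mp (by simp)
    rw [heq, List.append_assoc, List.singleton_append]
    have hs' : (z :: s).Pairwise (fun p q => p.1 ≤ q.1) :=
      List.pairwise_cons.mpr ⟨fun q hq => hls z hzl q hq, hs⟩
    have hls' : ∀ p ∈ l', ∀ q ∈ z :: s, p.1 ≤ q.1 := by
      intro p hp q hq
      have hpl : p ∈ l := hperm.mem_iff.mp (by simp [hp])
      rcases List.mem_cons.mp hq with rfl | hq'
      · exact hle _ hp
      · exact hls p hpl q hq'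
    obtain ⟨h1, h2⟩ := ih l' (z :: s) hlen hs' hls'
    refine ⟨h1, h2.trans ?_⟩
    rw [show l' ++ z :: s = (l' ++ [z]) ++ s by simp]
    exact hperm.append_right s

theorem pvZipMaps (deps : List String) (tots : List Int) (h : deps.length = tots.length) :
    (deps.zip tots).map Prod.fst = deps ∧ (deps.zip tots).map Prod.snd = tots :=
  ⟨List.map_fst_zip (le_of_eq h), List.map_snd_zip (ge_of_eq h)⟩

theorem pvZipBubblePass (m : Nat) (deps : List String) (tots : List Int)
    (h : deps.length = tots.length) :
    pvBubblePass deps tots m =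
      ((pvPass (deps.zip tots) m).map Prod.fst, (pvPass (deps.zip tots) m).map Prod.snd) := by
  induction m generalizing deps tots with
  | zero =>
    obtain ⟨h1, h2⟩ := pvZipMaps deps tots h
    match deps, tots with
    | [], [] => simp [pvBubblePass, pvPass]
    | [d], [t] => simp [pvBubblePass, pvPass]
    | d1 :: d2 :: ds, t1 :: t2 :: ts =>
      simp only [pvBubblePass, pvPass]
      exact Prod.ext h1.symm h2.symm
  | succ m ih =>
    match deps, tots with
    | [], [] => simp [pvBubblePass, pvPass]
    | [d], [t] => simp [pvBubblePass, pvPass]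
    | d1 :: d2 :: ds, t1 :: t2 :: ts =>
      have hl : (d1 :: ds).length = (t1 :: ts).length := by simpa using h
      have hl' : (d2 :: ds).length = (t2 :: ts).length := by simpa using h
      simp only [pvBubblePass, List.zip_cons_cons, pvPass]
      by_cases hc : d2 < d1
      · simp only [hc, if_pos, if_true]
        rw [ih _ _ hl]
        simp [List.zip_cons_cons]
      · simp only [hc, if_neg, if_false]
        rw [ih _ _ hl']
        simp [List.zip_cons_cons]

theorem pvOuterZip (r : List Int) (f : Int → Nat) (deps : List String) (tots : List Int)
    (h : deps.length = tots.length) :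
    r.foldl (fun (st : List String × List Int) i => pvBubblePass st.1 st.2 (f i)) (deps, tots) =
      (((r.foldl (fun z i => pvPass z (f i)) (deps.zip tots)).map Prod.fst),
       ((r.foldl (fun z i => pvPass z (f i)) (deps.zip tots)).map Prod.snd)) := by
  induction r generalizing deps tots with
  | nil =>
    obtain ⟨h1, h2⟩ := pvZipMaps deps tots h
    simp [h1, h2]
  | cons i rest ih =>
    simp only [List.foldl_cons]
    rw [pvZipBubblePass (f i) deps tots h]
    set W := pvPass (deps.zip tots) (f i) with hW
    have hlen : (W.map Prod.fst).length = (W.map Prod.snd).length := by simp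
    rw [ih _ _ hlen]
    have hz : (W.map Prod.fst).zip (W.map Prod.snd) = W := Eq.symm (List.zip_of_prod rfl rfl)
    rw [hz]

theorem pvRangeGo (j : Nat) : ∀ (c : Nat) (l : List (String × Int)),
    (PySem.List.pyRange (c : Int) ((c + j : Nat) : Int) 1).foldl
      (fun z i => pvPass z ((c + j) - i.toNat - 1)) l = pvGo l j := by
  induction j with
  | zero =>
    intro c l
    rw [PySem.List.pyRange_one_eq_nil (by simp)]
    simp [pvGo]
  | succ j ih =>
    intro c l
    rw [PySem.List.pyRange_one_cons (by push_cast; omega)]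
    simp only [List.foldl_cons]
    have h1 : ((c : Int)).toNat = c := by simp
    have h2 : (c + (j + 1)) - c - 1 = j := by omega
    rw [h1, h2]
    have h3 : ((c : Int) + 1) = ((c + 1 : Nat) : Int) := by push_cast; ring
    have h4 : ((c + (j + 1) : Nat) : Int) = (((c + 1) + j : Nat) : Int) := by push_cast; ring
    have h5 : ∀ (z : List (String × Int)) (i : Int),
        pvPass z ((c + (j + 1)) - i.toNat - 1) = pvPass z (((c + 1) + j) - i.toNat - 1) := by
      intro z i; congr 1; omega
    rw [h3, h4]
    calc (PySem.List.pyRange ((c + 1 : Nat) : Int) (((c + 1) + j : Nat) : Int) 1).foldl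
          (fun z i => pvPass z ((c + (j + 1)) - i.toNat - 1)) (pvPass l j)
        = (PySem.List.pyRange ((c + 1 : Nat) : Int) (((c + 1) + j : Nat) : Int) 1).foldl
          (fun z i => pvPass z (((c + 1) + j) - i.toNat - 1)) (pvPass l j) := by
          apply PySem.List.foldl_congr_mem
          intro acc x _
          exact h5 acc x
      _ = pvGo (pvPass l j) j := ih (c + 1) (pvPass l j)
      _ = pvGo l (j + 1) := rfl

theorem pvZipLoop (d : List String) (t : List Int) (h : d.length = t.length) :
    (PySem.List.pyRange 0 (d.length : Int) 1).foldl
      (fun acc i => acc ++ [(d.getD i.toNat "", t.getD i.toNat 0)]) [] = d.zip t := by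
  rw [PySem.List.foldl_append_singleton_eq_map]
  apply List.ext_getElem
  · simp [PySem.List.length_pyRange_one, h]
  · intro i h1 h2
    have hi : i < d.length := by
      simpa [PySem.List.length_pyRange_one] using h1
    have hip : i < (PySem.List.pyRange 0 (d.length : Int) 1).length := by
      simpa [PySem.List.length_pyRange_one] using hi
    have hget : (PySem.List.pyRange 0 (d.length : Int) 1)[i]'hip = (i : Int) := by
      rw [PySem.List.getElem_pyRange_one]; ring
    simp only [List.nil_append, List.getElem_map, hget]
    rw [List.getElem_zip]
    have : ((i : Int)).toNat = i := by simp
    rw [this, List.getD_eq_getElem _ _ hi, List.getD_eq_getElem _ _ (h ▸ hi)]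

theorem pvTot_perm (d : String) {l l' : List (String × String × List Int)} (h : l.Perm l') :
    pvTot d l = pvTot d l' := by
  unfold pvTot
  exact List.Perm.sum_eq ((h.filter _).map _)

theorem pvDropWhileGt (k : String) (rest : List (String × String × List Int))
    (hp : rest.Pairwise (fun a b => a.2.1 ≤ b.2.1)) (hb : ∀ q ∈ rest, k ≤ q.2.1) :
    ∀ q ∈ rest.dropWhile (fun q => q.2.1 == k), k < q.2.1 := by
  induction rest with
  | nil => simp
  | cons h' tl ih =>
    by_cases hc : h'.2.1 == k
    · simp only [List.dropWhile_cons, hc, if_true]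
      exact ih (List.pairwise_cons.mp hp).2 (fun q hq => hb q (List.mem_cons_of_mem _ hq))
    · simp only [List.dropWhile_cons, hc, if_false]
      intro q hq
      rcases List.mem_cons.mp hq with rfl | hq'
      · exact lt_of_le_of_ne (hb _ (List.mem_cons_self)) (fun he => hc (by simp [he.symm]))
      · -- q in tl: h' ≤ q; if q.2.1 = k then h'.2.1 ≤ k and k ≤ h'.2.1 gives h'.2.1 = k, contra
        have h1 : h'.2.1 ≤ q.2.1 := (List.pairwise_cons.mp hp).1 q hq'
        have h2 : k ≤ q.2.1 := hb q (List.mem_cons_of_mem _ hq')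
        apply lt_of_le_of_ne h2
        intro he
        have h3 : h'.2.1 ≤ k := he ▸ h1
        have h4 : k ≤ h'.2.1 := hb h' List.mem_cons_self
        exact hc (by simp [le_antisymm h3 h4])

theorem pvGroupSum_spec (l : List (String × String × List Int))
    (hp : l.Pairwise (fun a b => a.2.1 ≤ b.2.1)) :
    (pvGroupSum l).Pairwise (fun p q => p.1 < q.1)
    ∧ (∀ p ∈ pvGroupSum l, p.2 = pvTot p.1 l)
    ∧ (∀ x, x ∈ (pvGroupSum l).map Prod.fst ↔ x ∈ l.map (fun r => r.2.1)) := by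
  induction l using pvGroupSum.induct with
  | case1 => simp [pvGroupSum]
  | case2 r rest ih =>
    set k := r.2.1 with hk
    set g := rest.takeWhile (fun q => q.2.1 == k) with hg
    set dr := rest.dropWhile (fun q => q.2.1 == k) with hd
    have hrest : rest.Pairwise (fun a b => a.2.1 ≤ b.2.1) := (List.pairwise_cons.mp hp).2
    have hbnd : ∀ q ∈ rest, k ≤ q.2.1 := (List.pairwise_cons.mp hp).1
    have hgk : ∀ q ∈ g, q.2.1 = k := by
      intro q hq
      rw [hg] at hq
      have := List.mem_takeWhile_imp hq
      simpa using this
    have hdgt : ∀ q ∈ dr, k < q.2.1 := pvDropWhileGt k rest hrest hbnd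
    have hdp : dr.Pairwise (fun a b => a.2.1 ≤ b.2.1) :=
      hrest.sublist (hd ▸ List.dropWhile_sublist _)
    obtain ⟨ih1, ih2, ih3⟩ := ih hdp
    have hsplit : rest = g ++ dr := (List.takeWhile_append_dropWhile (l := rest)).symm
    -- filter of the run part
    have hfg : ∀ d : String, d ≠ k → g.filter (fun q => q.2.1 == d) = [] := by
      intro d hdk
      rw [List.filter_eq_nil_iff]
      intro q hq
      simp only [hgk q hq, beq_iff_eq]
      exact fun h => hdk h.symm
    have hfgk : g.filter (fun q => q.2.1 == k) = g := by
      rw [List.filter_eq_self]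
      intro q hq; simp only [hgk q hq, beq_self_eq_true]
    have hfd : ∀ d : String, d ≤ k → dr.filter (fun q => q.2.1 == d) = [] := by
      intro d hdk
      rw [List.filter_eq_nil_iff]
      intro q hq
      have := hdgt q hq
      simp only [beq_iff_eq]
      intro he
      exact absurd (he ▸ this) (not_lt.mpr hdk)
    have htotk : pvTot k (r :: rest) = r.2.2.sum + (g.map (fun q => q.2.2.sum)).sum := by
      unfold pvTot
      rw [hsplit]
      simp only [List.filter_cons, List.filter_append]
      rw [hfgk, hfd k le_rfl]
      rw [if_pos (show (r.2.1 == k) = true by simp [hk])]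
      simp
    have htotd : ∀ d : String, k < d → pvTot d (r :: rest) = pvTot d dr := by
      intro d hkd
      unfold pvTot
      rw [hsplit]
      simp only [List.filter_cons, List.filter_append]
      rw [hfg d (fun he => absurd (he ▸ hkd) (lt_irrefl k))]
      have hrk : (r.2.1 == d) = false := by
        simp only [beq_eq_false_iff_ne, ne_eq, ← hk]
        intro he; exact absurd (he ▸ hkd) (lt_irrefl _)
      simp [hrk]
    refine ⟨?_, ?_, ?_⟩
    · rw [pvGroupSum]
      refine List.pairwise_cons.mpr ⟨?_, ih1⟩
      intro p hp'
      have : p.1 ∈ (pvGroupSum dr).map Prod.fst := List.mem_map_of_mem hp'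
      have hx : p.1 ∈ dr.map (fun r => r.2.1) := (ih3 p.1).mp this
      obtain ⟨q, hq, hqe⟩ := List.mem_map.mp hx
      exact hqe ▸ hdgt q hq
    · rw [pvGroupSum]
      intro p hp'
      rcases List.mem_cons.mp hp' with rfl | hp''
      · simpa using htotk.symm
      · have h1 := ih2 p hp''
        have : p.1 ∈ (pvGroupSum dr).map Prod.fst := List.mem_map_of_mem hp''
        obtain ⟨q, hq, hqe⟩ := List.mem_map.mp ((ih3 p.1).mp this)
        have hkp : k < p.1 := hqe ▸ hdgt q hq
        rw [h1, htotd p.1 hkp]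
    · intro x
      rw [pvGroupSum]
      simp only [List.map_cons, List.mem_cons]
      constructor
      · rintro (rfl | hx)
        · simp
        · have := (ih3 x).mp hx
          obtain ⟨q, hq, hqe⟩ := List.mem_map.mp this
          have : q ∈ rest := hsplit ▸ List.mem_append_right _ hq
          right
          exact List.mem_map.mpr ⟨q, this, hqe⟩
      · rintro (hx | hx)
        · exact Or.inl hx
        · obtain ⟨q, hq, hqe⟩ := List.mem_map.mp hx
          rw [hsplit] at hq
          rcases List.mem_append.mp hq with hq' | hq'
          · exact Or.inl (by rw [← hqe, hgk q hq'])
          · exact Or.inr ((ih3 x).mpr (List.mem_map.mpr ⟨q, hq', hqe⟩))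

theorem pvTot_cons (d : String) (r : String × String × List Int)
    (cd : List (String × String × List Int)) :
    pvTot d (r :: cd) = (if r.2.1 = d then r.2.2.sum else 0) + pvTot d cd := by
  unfold pvTot
  rw [List.filter_cons]
  by_cases h : r.2.1 = d
  · simp [h]
  · simp [h]

theorem pvAggInv (cd : List (String × String × List Int)) (deps : List String) (g : String → Int)
    (hnd : deps.Nodup) :
    ∃ deps',
      (cd.foldl (fun (st : List String × List Int) item =>
        let department := item.2.1
        let enrollments := item.2.2
        let index := pvFindIdx st.1 department 0
        if index == -1 then
          (st.1 ++ [department], st.2 ++ [enrollments.foldl (fun acc x => acc + x) 0])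
        else
          (st.1, enrollments.foldl (fun ts x => ts.set index.toNat (ts.getD index.toNat 0 + x)) st.2))
        (deps, deps.map g))
      = (deps', deps'.map (fun d => (if d ∈ deps then g d else 0) + pvTot d cd))
      ∧ deps'.Nodup ∧ (∀ d, d ∈ deps' ↔ d ∈ deps ∨ d ∈ cd.map (fun r => r.2.1)) := by
  induction cd generalizing deps g with
  | nil =>
    refine ⟨deps, ?_, hnd, by simp⟩
    simp only [List.foldl_nil, pvTot]
    congr 1
    apply List.map_congr_left
    intro d hd
    simp [hd]
  | cons r cd' ih =>
    simp only [List.foldl_cons]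
    by_cases hm : r.2.1 ∈ deps
    · -- existing department: totals[index] += x loop
      have hidx : pvFindIdx deps r.2.1 0 = (deps.idxOf r.2.1 : Int) := by
        rw [pvFindIdx_spec]; simp [hm]
      have hcond : ((pvFindIdx deps r.2.1 0) == (-1 : Int)) = false := by
        rw [hidx]; simp
      have hlt : deps.idxOf r.2.1 < (deps.map g).length := by
        simpa using List.idxOf_lt_length_of_mem hm
      have htn : (pvFindIdx deps r.2.1 0).toNat = deps.idxOf r.2.1 := by
        rw [hidx]; simp
      simp only [hcond, Bool.false_eq_true, if_false, htn]
      rw [pvSetFold _ _ _ hlt]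
      have hgetD : (deps.map g).getD (deps.idxOf r.2.1) 0 = g r.2.1 := by
        rw [List.getD_eq_getElem _ _ hlt, List.getElem_map]
        congr 1
        exact List.getElem_idxOf (by simpa using hlt)
      rw [hgetD, pvMapSet deps g r.2.1 _ hnd hm]
      obtain ⟨deps', heq, hnd', hmem⟩ :=
        ih deps (fun d => if d = r.2.1 then g r.2.1 + r.2.2.sum else g d) hnd
      refine ⟨deps', ?_, hnd', ?_⟩
      · rw [heq]
        congr 1
        apply List.map_congr_left
        intro d hd
        rw [pvTot_cons]
        by_cases hdd : d ∈ deps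
        · simp only [hdd, if_true]
          by_cases hkd : d = r.2.1
          · subst hkd; simp; ring
          · simp [hkd]
            intro h
            exact absurd h.symm hkd
        · have hkd : ¬ d = r.2.1 := fun h => hdd (h ▸ hm)
          simp [hdd]
          intro h
          exact absurd h.symm hkd
      · intro d
        rw [hmem d]
        simp only [List.map_cons, List.mem_cons]
        constructor
        · rintro (h | h)
          · exact Or.inl h
          · exact Or.inr (Or.inr h)
        · rintro (h | h | h)
          · exact Or.inl h
          · exact Or.inl (h ▸ hm)
          · exact Or.inr h
    · -- new department: append to both lists
      have hcond : ((pvFindIdx deps r.2.1 0) == (-1 : Int)) = true := by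
        rw [pvFindIdx_spec]; simp [hm]
      simp only [hcond, if_true]
      have hsum : r.2.2.foldl (fun acc x => acc + x) 0 = r.2.2.sum := by
        simpa using PySem.List.foldl_add (l := r.2.2) (g := fun x : Int => x) (a := 0)
      have hnd2 : (deps ++ [r.2.1]).Nodup := by
        simp only [List.nodup_append, List.nodup_cons, List.not_mem_nil, not_false_iff, List.nodup_nil, and_true]
        exact ⟨hnd, by simpa using fun a ha (h : a = r.2.1) => hm (h ▸ ha)⟩
      have happ : deps.map g ++ [r.2.2.foldl (fun acc x => acc + x) 0]
          = (deps ++ [r.2.1]).map (fun d => if d = r.2.1 then r.2.2.sum else g d) := by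
        rw [List.map_append]
        congr 1
        · apply Eq.symm
          apply List.map_congr_left
          intro d hd
          have : ¬ d = r.2.1 := fun h => hm (h ▸ hd)
          simp [this]
        · simp [hsum]
      rw [happ]
      obtain ⟨deps', heq, hnd', hmem⟩ :=
        ih (deps ++ [r.2.1]) (fun d => if d = r.2.1 then r.2.2.sum else g d) hnd2
      refine ⟨deps', ?_, hnd', ?_⟩
      · rw [heq]
        congr 1
        apply List.map_congr_left
        intro d hd
        rw [pvTot_cons]
        by_cases hkd : d = r.2.1
        · subst hkd
          simp [hm]
        · have h2 : ¬ r.2.1 = d := fun h => hkd h.symm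
          by_cases hdd : d ∈ deps
          · simp [hkd, h2, hdd, List.mem_append]
          · simp [hkd, h2, hdd, List.mem_append]
      · intro d
        rw [hmem d]
        simp only [List.mem_append, List.mem_singleton, List.map_cons, List.mem_cons]
        tauto

theorem pvRangeGo0 (n : Nat) (l : List (String × Int)) :
    (PySem.List.pyRange 0 (n : Int) 1).foldl (fun z i => pvPass z (n - i.toNat - 1)) l = pvGo l n := by
  have h := pvRangeGo n 0 l
  simpa using h

theorem pvZipSelf (deps : List String) (f : String → Int) :
    deps.zip (deps.map f) = deps.map (fun d => (d, f d)) := by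
  induction deps with
  | nil => rfl
  | cons d rest ih => simp [ih]

theorem pvEntryShape (L : List (String × Int)) (F : String → Int)
    (h : ∀ p ∈ L, p.2 = F p.1) :
    L = (L.map Prod.fst).map (fun d => (d, F d)) := by
  induction L with
  | nil => rfl
  | cons p rest ih =>
    simp only [List.map_cons]
    rw [← ih (fun q hq => h q (List.mem_cons_of_mem _ hq)),
        ← h p List.mem_cons_self]

-- ===== VERDICT (by name: the statement is the Claim_ definition above) =====
theorem get_department_enrollment_summary_spec : Claim_equal_get_department_enrollment_summary := by
  intro cd _
  unfold Spec_get_department_enrollment_summary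
  -- A side: aggregation invariant
  obtain ⟨deps, heq, hnd, hmem⟩ := pvAggInv cd [] (fun _ => 0) List.nodup_nil
  simp only [List.map_nil] at heq
  have hF : (fun d => (if d ∈ ([] : List String) then (0:Int) else 0) + pvTot d cd)
      = (fun d => pvTot d cd) := by funext d; simp
  rw [hF] at heq
  simp only [get_department_enrollment_summary]
  rw [heq]
  set f : String → Int := fun d => pvTot d cd with hf
  set n := deps.length with hn
  have hlen0 : deps.length = (deps.map f).length := by simp
  rw [pvOuterZip _ _ _ _ hlen0]
  set Z0 := deps.zip (deps.map f) with hZ0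
  rw [pvRangeGo0 n Z0]
  set R := pvGo Z0 n with hR
  rw [show ((R.map Prod.fst, R.map Prod.snd) : List String × List Int).1 = R.map Prod.fst from rfl,
      show ((R.map Prod.fst, R.map Prod.snd) : List String × List Int).2 = R.map Prod.snd from rfl]
  have hZ0eq : Z0 = deps.map (fun d => (d, f d)) := pvZipSelf deps f
  have hZ0len : Z0.length = n := by rw [hZ0eq]; simp [hn]
  have hgs := pvGo_sorted n Z0 [] hZ0len (by simp) (by simp)
  rw [List.append_nil] at hgs
  obtain ⟨hRle, hRperm⟩ := hgs
  have hRlen : R.length = n := by rw [hR, hRperm.length_eq, hZ0len]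
  -- the final zip loop rebuilds R
  have hzl := pvZipLoop (R.map Prod.fst) (R.map Prod.snd) (by simp)
  have hcast : ((R.map Prod.fst).length : Int) = (n : Int) := by
    simp [hRlen]
  rw [hcast] at hzl
  rw [hzl, Eq.symm (List.zip_of_prod rfl rfl)]
  -- B side
  simp only [get_department_enrollment_summary_alt]
  set rows := PySem.List.sorted cd (fun r => r.2.1) false with hrows
  have hrp : rows.Pairwise (fun a b => a.2.1 ≤ b.2.1) := by
    simpa using PySem.List.sorted_pairwise cd (fun r => r.2.1)
  have hrperm : rows.Perm cd := PySem.List.sorted_perm cd (fun r => r.2.1) false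
  obtain ⟨hS1, hS2, hS3⟩ := pvGroupSum_spec rows hrp
  set S := pvGroupSum rows with hS
  -- S has the canonical entry shape
  have hS2' : ∀ p ∈ S, p.2 = f p.1 := by
    intro p hp
    rw [hS2 p hp, hf]
    exact pvTot_perm _ hrperm
  have hSshape : S = (S.map Prod.fst).map (fun d => (d, f d)) := pvEntryShape S f hS2'
  -- keys of S are a permutation of deps
  have hSkeys_nodup : (S.map Prod.fst).Nodup := by
    have : (S.map Prod.fst).Pairwise (· < ·) := List.pairwise_map.mpr hS1
    exact this.imp ne_of_lt
  have hmemdeps : ∀ d, d ∈ deps ↔ d ∈ cd.map (fun r => r.2.1) := by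
    intro d
    rw [hmem d]
    simp
  have hSkeys_mem : ∀ x, x ∈ S.map Prod.fst ↔ x ∈ deps := by
    intro x
    rw [hS3 x, hmemdeps x]
    constructor
    · rintro hx
      obtain ⟨q, hq, hqe⟩ := List.mem_map.mp hx
      exact List.mem_map.mpr ⟨q, hrperm.mem_iff.mp hq, hqe⟩
    · rintro hx
      obtain ⟨q, hq, hqe⟩ := List.mem_map.mp hx
      exact List.mem_map.mpr ⟨q, hrperm.mem_iff.mpr hq, hqe⟩
  have hkeysperm : (S.map Prod.fst).Perm deps :=
    (List.perm_ext_iff_of_nodup hSkeys_nodup hnd).mpr hSkeys_mem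
  -- S ~ Z0 ~ R
  have hSZ : S.Perm Z0 := by
    rw [hSshape, hZ0eq]
    exact hkeysperm.map _
  have hSR : R.Perm S := hRperm.trans hSZ.symm
  -- R is strictly sorted on keys too
  have hRkeys_nodup : (R.map Prod.fst).Nodup := by
    have h1 : (R.map Prod.fst).Perm (S.map Prod.fst) := hSR.map _
    exact h1.nodup_iff.mpr hSkeys_nodup
  have hRlt : R.Pairwise (fun p q => p.1 < q.1) := by
    have hne : R.Pairwise (fun p q => p.1 ≠ q.1) :=
      List.pairwise_map.mp hRkeys_nodup
    exact (hRle.and hne).imp (fun h => lt_of_le_of_ne h.1 h.2)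
  -- two strictly key-sorted permutations are equal
  exact List.Perm.eq_of_pairwise (fun a b _ _ h h' => absurd h' (lt_asymm h)) hRlt hS1 hSR
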